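-- pv_equiv track=rewrite | github.com/ganeshparsads/OAs | data_expr.py | valid_expression
-- ===== SOURCE A (Python) =====
-- def valid_expression(expr_str):
-- 	leng = len(expr_str)
-- 	isdigit = True
-- 	for i in expr_str:
-- 		if bool(isdigit) != bool(i.isdigit()):
-- 			return False
--
-- 		if isdigit and i.isdigit():
-- 			isdigit = False
-- 			continue
--
-- 		isdigit = True
--
-- 	return True
-- ===== SOURCE B (Python) =====
-- def valid_expression(expr_str):
--     head_ok = (not expr_str) or expr_str[0].isdigit()
--     return head_ok and all(a.isdigit() != b.isdigit()
--                            for a, b in zip(expr_str, expr_str[1:]))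
-- ===== Notes on version B (the rewrite author's own statement) =====
-- stated objective: simpler
-- what changed: Replaces A's stateful toggle loop with early return by a stateless local check: the first character must be a digit and every adjacent pair must differ in digitness (zip with the tail).
import Mathlib
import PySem

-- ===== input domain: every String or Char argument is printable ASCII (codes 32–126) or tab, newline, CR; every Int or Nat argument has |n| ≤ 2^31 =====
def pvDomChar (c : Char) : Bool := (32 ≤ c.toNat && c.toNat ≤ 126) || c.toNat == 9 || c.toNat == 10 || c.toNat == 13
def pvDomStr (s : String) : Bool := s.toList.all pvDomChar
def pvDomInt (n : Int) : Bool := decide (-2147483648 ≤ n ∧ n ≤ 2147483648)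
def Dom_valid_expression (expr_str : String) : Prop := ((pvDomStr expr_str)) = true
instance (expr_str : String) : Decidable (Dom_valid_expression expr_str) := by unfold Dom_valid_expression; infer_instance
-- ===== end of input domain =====

-- B replaces A's stateful toggle loop (with early return) by a stateless check:
-- head must be a digit and every adjacent pair must differ in digitness (simpler decomposition).


-- ===== PORT A =====
-- A's loop: a Bool flag `isdigit`, early return False on mismatch, toggled as in the Python.
def vaLoop : List Char → Bool → Bool
  | [], _ => true
  | c :: rest, isdigit =>
    if isdigit != PySem.Chars.isdigit c then false
    else if isdigit && PySem.Chars.isdigit c then vaLoop rest false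
    else vaLoop rest true

def valid_expression (expr_str : String) : Bool :=
  vaLoop expr_str.toList true

-- ===== PORT B =====
def valid_expression_alt (expr_str : String) : Bool :=
  let l := expr_str.toList
  let head_ok := match l with
    | [] => true                     -- `not expr_str` : empty string is falsy
    | c :: _ => PySem.Chars.isdigit c
  head_ok &&
    (l.zip (PySem.Chars.slice l (some 1) none)).all
      (fun p => PySem.Chars.isdigit p.1 != PySem.Chars.isdigit p.2)

-- ===== PRECONDITION & SPEC =====
def Spec_valid_expression (expr_str : String) (out : Bool) : Prop := out = valid_expression_alt expr_str
instance (expr_str : String) (out : Bool) : Decidable (Spec_valid_expression expr_str out) := by unfold Spec_valid_expression; infer_instance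

-- ===== CLAIM (what is proved, stated in full; the proofs are below) =====
def Claim_equal_valid_expression : Prop := ∀ (expr_str : String), Dom_valid_expression expr_str → Spec_valid_expression expr_str (valid_expression expr_str)

-- ===== LEMMAS AND PROOFS =====

-- Invariant of A's loop: the flag must match the head's digitness, and thereafter
-- adjacent characters must differ in digitness.
theorem vaLoop_eq (l : List Char) (f : Bool) :
    vaLoop l f =
      ((match l with
        | [] => true
        | c :: _ => PySem.Chars.isdigit c == f) &&
       (l.zip l.tail).all
         (fun p => PySem.Chars.isdigit p.1 != PySem.Chars.isdigit p.2)) := by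
  induction l generalizing f with
  | nil => rfl
  | cons c rest ih =>
    cases rest with
    | nil =>
      cases hc : PySem.Chars.isdigit c <;> cases f <;> simp [vaLoop, hc]
    | cons b rest' =>
      have h := ih (!f)
      cases hc : PySem.Chars.isdigit c <;> cases hb : PySem.Chars.isdigit b <;>
        cases f <;> simp [vaLoop, hc, hb] at h ⊢ <;> simp [h]

-- ===== VERDICT (by name: the statement is the Claim_ definition above) =====
theorem valid_expression_spec : Claim_equal_valid_expression := by
  intro s _
  show valid_expression s = valid_expression_alt s
  unfold valid_expression valid_expression_alt
  rw [vaLoop_eq]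
  simp only [PySem.Chars.slice]
  rw [PySem.List.slice_from_one]
  cases h : s.toList with
  | nil => simp
  | cons c rest => simp
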